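-- pv_equiv track=rewrite | github.com/codylico/mktemplate | mktemplate.py | filter_insertchars
-- ===== SOURCE A (Python) =====
-- def filter_insertchars(s,chars=None,space=' '):
--   """insertchars(s,chars=None,space=' ') -> str
--
-- Insert space before each occurence of a character in chars."""
--   xchars = str(chars)
--   out = ''
--   for x in s:
--     if x in xchars:
--       out += space
--     out += x
--   return out
-- ===== SOURCE B (Python) =====
-- def filter_insertchars(s, chars=None, space=' '):
--   """insertchars(s,chars=None,space=' ') -> str
--
-- Insert space before each occurence of a character in chars."""
--   table = {ord(c): space + c for c in str(chars)}
--   return s.translate(table)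
-- ===== Notes on version B (the rewrite author's own statement) =====
-- stated objective: idiomatic
-- what changed: Replaces the explicit per-character loop with string concatenation and membership test by a precomputed translation table (char -> space+char for each char of str(chars)) consumed in a single str.translate pass.
import Mathlib
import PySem

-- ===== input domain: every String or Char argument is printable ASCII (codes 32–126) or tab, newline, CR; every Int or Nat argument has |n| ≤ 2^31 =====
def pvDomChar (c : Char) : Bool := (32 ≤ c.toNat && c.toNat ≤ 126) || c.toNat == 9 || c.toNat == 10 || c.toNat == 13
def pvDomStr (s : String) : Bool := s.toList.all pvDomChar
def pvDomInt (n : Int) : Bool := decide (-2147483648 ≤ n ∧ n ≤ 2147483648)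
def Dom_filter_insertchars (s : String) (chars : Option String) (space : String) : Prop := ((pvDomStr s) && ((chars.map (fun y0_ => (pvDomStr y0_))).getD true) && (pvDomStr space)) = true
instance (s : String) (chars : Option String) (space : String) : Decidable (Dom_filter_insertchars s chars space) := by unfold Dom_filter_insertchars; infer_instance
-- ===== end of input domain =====

-- B builds a translation table (char -> space+char) once and maps s through it in one
-- translate pass, instead of A's per-character membership test and string accumulation.

-- ===== PORT A =====
-- str(chars): None prints as "None", a string prints as itself
def pvStrOfChars (chars : Option String) : String :=
  match chars with
  | none => "None"
  | some c => c

def filter_insertchars (s : String) (chars : Option String) (space : String) : String :=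
  let xchars := pvStrOfChars chars
  s.toList.foldl
    (fun out x =>
      (if xchars.toList.contains x then out ++ space else out) ++ String.mk [x])
    ""

-- ===== PORT B =====
def filter_insertchars_alt (s : String) (chars : Option String) (space : String) : String :=
  let table : PySem.Dict Char String :=
    (pvStrOfChars chars).toList.foldl
      (fun d c => d.insert c (space ++ String.mk [c])) PySem.Dict.empty
  -- s.translate(table): each char independently replaced by its mapping, kept if absent
  String.join (s.toList.map (fun c => (table.get? c).getD (String.mk [c])))

-- ===== PRECONDITION & SPEC =====
def Spec_filter_insertchars (s : String) (chars : Option String) (space : String) (out : String) : Prop := out = filter_insertchars_alt s chars space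
instance (s : String) (chars : Option String) (space : String) (out : String) : Decidable (Spec_filter_insertchars s chars space out) := by unfold Spec_filter_insertchars; infer_instance

-- ===== CLAIM (what is proved, stated in full; the proofs are below) =====
def Claim_equal_filter_insertchars : Prop := ∀ (s : String) (chars : Option String) (space : String), Dom_filter_insertchars s chars space → Spec_filter_insertchars s chars space (filter_insertchars s chars space)

-- ===== LEMMAS AND PROOFS =====

-- lookup in a table built by inserting f x for every x of l
theorem get?_foldl_insert_fun (f : Char → String) (l : List Char) (d : PySem.Dict Char String) (c : Char) :
    (l.foldl (fun d x => d.insert x (f x)) d).get? c =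
      if c ∈ l then some (f c) else d.get? c := by
  induction l generalizing d with
  | nil => simp
  | cons a rest ih =>
    simp only [List.foldl_cons, ih, List.mem_cons]
    by_cases h : c ∈ rest
    · simp [h]
    · by_cases hca : c = a
      · subst hca; simp [h, PySem.Dict.get?_insert_self]
      · simp [PySem.Dict.get?_insert, h, hca]

theorem join_cons (a : String) (l : List String) :
    String.join (a :: l) = a ++ String.join l := by
  have key : ∀ (l : List String) (acc : String),
      l.foldl (· ++ ·) acc = acc ++ l.foldl (· ++ ·) "" := by
    intro l
    induction l with
    | nil => intro acc; simp
    | cons b rest ih =>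
      intro acc
      simp only [List.foldl_cons]
      rw [ih (acc ++ b), ih ("" ++ b)]
      simp [String.append_assoc]
  simp only [String.join, List.foldl_cons]
  rw [key l ("" ++ a)]
  simp

-- A's accumulator loop equals acc ++ the join of the per-char images
theorem foldlA (xchars space : String) (l : List Char) (acc : String) :
    l.foldl
        (fun out x =>
          (if xchars.toList.contains x then out ++ space else out) ++ String.mk [x])
        acc
      = acc ++ String.join (l.map
          (fun c => if xchars.toList.contains c then space ++ String.mk [c] else String.mk [c])) := by
  induction l generalizing acc with
  | nil => simp [String.join]
  | cons a rest ih =>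
    simp only [List.foldl_cons, List.map_cons, join_cons]
    rw [ih]
    by_cases h : a ∈ xchars.toList
    · simp [h, String.append_assoc]
    · simp [h, String.append_assoc]

-- ===== VERDICT (by name: the statement is the Claim_ definition above) =====
theorem filter_insertchars_spec : Claim_equal_filter_insertchars := by
  intro s chars space _
  unfold Spec_filter_insertchars filter_insertchars filter_insertchars_alt
  rw [foldlA]
  simp only [String.empty_append, get?_foldl_insert_fun]
  congr 1
  apply List.map_congr_left
  intro c _
  by_cases h : c ∈ (pvStrOfChars chars).toList
  · simp [h]
  · simp [h]
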